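-- pv_equiv track=rewrite | github.com/bhupeshpatil04/assignment_kuvaka | backend-assignment/app/scoring.py | industry_score
-- ===== SOURCE A (Python) =====
-- def industry_score(lead_industry: str, icp_list: list) -> int:
--     if not lead_industry:
--         return 0
--     li = lead_industry.strip().lower()
--     icp_lower = [i.strip().lower() for i in icp_list]
--     if li in icp_lower:
--         return 20
--     for icp in icp_lower:
--         if any(token in li for token in icp.split()):
--             return 10
--     return 0
-- ===== SOURCE B (Python) =====
-- def industry_score(lead_industry: str, icp_list: list) -> int:
--     if not lead_industry:
--         return 0
--     li = lead_industry.strip().lower()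
--     partial = False
--     for icp in icp_list:
--         e = icp.strip().lower()
--         if li == e:
--             return 20
--         if not partial:
--             partial = any(token in li for token in e.split())
--     return 10 if partial else 0
-- ===== Notes on version B (the rewrite author's own statement) =====
-- stated objective: alternative
-- what changed: Replaces A's pre-built lowered list plus separate membership test and early-returning partial loop with one fused pass that normalizes each entry on the fly, returns 20 at the first exact match and accumulates a partial flag (skipping token work once set), deciding 10/0 after the scan.
import Mathlib
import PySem

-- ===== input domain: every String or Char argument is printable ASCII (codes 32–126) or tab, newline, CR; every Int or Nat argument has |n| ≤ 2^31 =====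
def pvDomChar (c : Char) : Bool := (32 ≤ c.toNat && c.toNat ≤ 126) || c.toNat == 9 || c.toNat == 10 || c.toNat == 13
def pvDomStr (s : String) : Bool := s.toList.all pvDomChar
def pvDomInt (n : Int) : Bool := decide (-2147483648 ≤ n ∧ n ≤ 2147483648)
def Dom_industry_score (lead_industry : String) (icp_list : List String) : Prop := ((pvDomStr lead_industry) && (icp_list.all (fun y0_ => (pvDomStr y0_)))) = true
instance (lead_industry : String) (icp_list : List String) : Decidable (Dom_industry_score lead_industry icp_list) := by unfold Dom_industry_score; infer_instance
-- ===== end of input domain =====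

-- B is an alternative decomposition: one pass accumulating exact/partial flags instead of a
-- pre-built lowered list, a membership test and an early-returning loop; same cost, same values.

-- shared transliterations of the sub-expressions both Pythons contain:
-- pvNorm i = i.strip().lower();  pvTokHit li e = any(token in li for token in e.split())
def pvNorm (i : String) : String := PySem.Str.lower (PySem.Str.strip i)
def pvTokHit (li e : String) : Bool := (PySem.Str.split₀ e).any (fun token => PySem.Str.isIn token li)

-- ===== PORT A =====
-- the 'for icp in icp_lower: if any(...): return 10' loop of A
def pvLoopA (li : String) : List String → Int
  | [] => 0
  | icp :: rest => if pvTokHit li icp then 10 else pvLoopA li rest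

def industry_score (lead_industry : String) (icp_list : List String) : Int :=
  if lead_industry = "" then 0
  else
    let li := pvNorm lead_industry
    let icp_lower := icp_list.map pvNorm
    if li ∈ icp_lower then 20
    else pvLoopA li icp_lower

-- ===== PORT B =====
-- B's fused loop over the raw icp_list: normalize on the fly, return 20 on an exact match,
-- otherwise accumulate the partial flag (token work skipped once it is set)
def pvLoopB (li : String) : List String → Bool → Int
  | [], partialFlag => if partialFlag then 10 else 0
  | icp :: rest, partialFlag =>
    let e := pvNorm icp
    if li == e then 20
    else pvLoopB li rest (if !partialFlag then pvTokHit li e else partialFlag)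

def industry_score_alt (lead_industry : String) (icp_list : List String) : Int :=
  if lead_industry = "" then 0
  else pvLoopB (pvNorm lead_industry) icp_list false

-- ===== PRECONDITION & SPEC =====
def Spec_industry_score (lead_industry : String) (icp_list : List String) (out : Int) : Prop := out = industry_score_alt lead_industry icp_list
instance (lead_industry : String) (icp_list : List String) (out : Int) : Decidable (Spec_industry_score lead_industry icp_list out) := by unfold Spec_industry_score; infer_instance

-- ===== CLAIM (what is proved, stated in full; the proofs are below) =====
def Claim_equal_industry_score : Prop := ∀ (lead_industry : String) (icp_list : List String), Dom_industry_score lead_industry icp_list → Spec_industry_score lead_industry icp_list (industry_score lead_industry icp_list)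

-- ===== LEMMAS AND PROOFS =====

lemma pvIfB (a ae t at' p : Bool) :
    (if a then (20:Int) else if ae then 20 else if ((if !p then t else p) || at') then 10 else 0)
      = if (a || ae) then 20 else if (p || (t || at')) then 10 else 0 := by
  cases a <;> cases ae <;> cases t <;> cases at' <;> cases p <;> simp

lemma pvLoopB_eq (li : String) (l : List String) : ∀ p : Bool,
    pvLoopB li l p = if l.any (fun i => li == pvNorm i) then 20
      else if (p || l.any (fun i => pvTokHit li (pvNorm i))) then 10 else 0 := by
  induction l with
  | nil => intro p; simp [pvLoopB]
  | cons x xs ih =>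
    intro p
    simp only [pvLoopB, List.any_cons]
    rw [ih]
    exact pvIfB _ _ _ _ _

lemma pvIfOr (a b : Bool) : (if a then (10:Int) else if b then 10 else 0) = if (a || b) then 10 else 0 := by
  cases a <;> cases b <;> simp

lemma pvLoopA_eq (li : String) (l : List String) :
    pvLoopA li (l.map pvNorm) = if l.any (fun i => pvTokHit li (pvNorm i)) then 10 else 0 := by
  induction l with
  | nil => simp [pvLoopA]
  | cons x xs ih =>
    simp only [List.map_cons, List.any_cons, pvLoopA]
    rw [ih, pvIfOr]
    rfl

lemma pvMem_iff (li : String) (l : List String) :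
    li ∈ l.map pvNorm ↔ l.any (fun i => li == pvNorm i) = true := by
  rw [List.any_eq_true]
  constructor
  · intro hm
    obtain ⟨i, hi, he⟩ := List.mem_map.mp hm
    exact ⟨i, hi, by simp [he]⟩
  · rintro ⟨i, hi, he⟩
    exact List.mem_map.mpr ⟨i, hi, (beq_iff_eq.mp he).symm⟩

-- ===== VERDICT (by name: the statement is the Claim_ definition above) =====
theorem industry_score_spec : Claim_equal_industry_score := by
  intro lead icp _
  unfold Spec_industry_score industry_score industry_score_alt
  by_cases h : lead = ""
  · simp [h]
  · simp only [h, if_false]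
    rw [pvLoopB_eq]
    simp only [Bool.false_or]
    rw [pvLoopA_eq]
    by_cases hm : pvNorm lead ∈ icp.map pvNorm
    · rw [if_pos hm, if_pos ((pvMem_iff _ icp).mp hm)]
    · rw [if_neg hm, if_neg (fun hc => hm ((pvMem_iff _ icp).mpr hc))]
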